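-- pv_equiv track=rewrite | github.com/openJiuwen-ai/agent-core | openjiuwen/auto_harness/infra/ci_gate_runner.py | _sanitize_failure_output
-- ===== SOURCE A (Python) =====
-- def _sanitize_failure_output(output: str) -> str:
--     """仅保留 pytest 的 FAILURES 和 short test summary info 区块。"""
--     if not output.strip():
--         return ""
--
--     lines = output.splitlines()
--     headers = {
--         "failures": "failures",
--         "short test summary info": "short test summary info",
--     }
--     current_section = ""
--     collected: dict[str, list[str]] = {
--         "failures": [],
--         "short test summary info": [],
--     }
--
--     for line in lines:
--         stripped = line.strip()
--         if stripped.startswith("=") and stripped.endswith("="):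
--             normalized = stripped.strip("=").strip().lower()
--             current_section = headers.get(normalized, "")
--             if current_section:
--                 collected[current_section].append(line)
--             continue
--         if current_section:
--             collected[current_section].append(line)
--
--     sections = [
--         "\n".join(collected["failures"]).strip(),
--         "\n".join(collected["short test summary info"]).strip(),
--     ]
--     sanitized = "\n\n".join(
--         section for section in sections if section
--     ).strip()
--     return sanitized or output.strip()
-- ===== SOURCE B (Python) =====
-- def _sanitize_failure_output(output: str) -> str:
--     """仅保留 pytest 的 FAILURES 和 short test summary info 区块。"""
--     if not output.strip():
--         return ""
--
--     lines = output.splitlines()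
--
--     def header_name(line):
--         stripped = line.strip()
--         if stripped.startswith("=") and stripped.endswith("="):
--             return stripped.strip("=").strip().lower()
--         return None
--
--     fail_block: list = []
--     summary_block: list = []
--     i, n = 0, len(lines)
--     while i < n:
--         name = header_name(lines[i])
--         if name == "failures":
--             j = i + 1
--             while j < n and header_name(lines[j]) is None:
--                 j += 1
--             fail_block.extend(lines[i:j])
--             i = j
--         elif name == "short test summary info":
--             j = i + 1
--             while j < n and header_name(lines[j]) is None:
--                 j += 1
--             summary_block.extend(lines[i:j])
--             i = j
--         else:
--             i += 1
--
--     sections = ["\n".join(fail_block).strip(), "\n".join(summary_block).strip()]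
--     sanitized = "\n\n".join(s for s in sections if s).strip()
--     return sanitized or output.strip()
-- ===== Notes on version B (the rewrite author's own statement) =====
-- stated objective: alternative
-- what changed: Replaces A's single stateful fold (current-section string carried across every line, dict of buckets) with a block-structured scan: at each matching header it consumes the whole run of non-header lines as one slice and appends it to that section's list, skipping other lines.
import Mathlib
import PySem

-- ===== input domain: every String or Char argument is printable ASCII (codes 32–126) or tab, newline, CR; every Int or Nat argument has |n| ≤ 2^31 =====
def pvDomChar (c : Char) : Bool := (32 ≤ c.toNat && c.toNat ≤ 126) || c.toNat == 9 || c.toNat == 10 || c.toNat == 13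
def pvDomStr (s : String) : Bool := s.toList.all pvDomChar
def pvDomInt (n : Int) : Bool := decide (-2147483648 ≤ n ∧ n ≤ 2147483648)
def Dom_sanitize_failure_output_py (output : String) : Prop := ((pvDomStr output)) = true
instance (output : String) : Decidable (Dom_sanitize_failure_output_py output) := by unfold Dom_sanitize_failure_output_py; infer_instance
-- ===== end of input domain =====

-- B is an alternative decomposition: instead of A's stateful line-by-line fold it consumes whole
-- header-delimited blocks; the two are proved to return the same string on every input.

-- ===== PORT A =====
-- A's loop state: (current_section, collected["failures"], collected["short test summary info"]);
-- the fixed-key dicts of A are transliterated as these three components.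
def pvStepA (st : String × List String × List String) (line : String) : String × List String × List String :=
  let stripped := PySem.Str.strip line
  if PySem.Str.startswith stripped "=" && PySem.Str.endswith stripped "=" then
    let normalized := PySem.Str.lower (PySem.Str.strip (PySem.Str.stripChars stripped "="))
    if normalized = "failures" then ("failures", st.2.1 ++ [line], st.2.2)
    else if normalized = "short test summary info" then
      ("short test summary info", st.2.1, st.2.2 ++ [line])
    else ("", st.2.1, st.2.2)
  else
    if st.1 = "failures" then (st.1, st.2.1 ++ [line], st.2.2)
    else if st.1 = "short test summary info" then (st.1, st.2.1, st.2.2 ++ [line])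
    else st

def sanitize_failure_output_py (output : String) : String :=
  if PySem.Str.strip output = "" then ""
  else
    let lines := PySem.Str.splitlines output
    let st := lines.foldl pvStepA ("", [], [])
    let sections := [PySem.Str.strip (PySem.Str.join "\n" st.2.1),
                     PySem.Str.strip (PySem.Str.join "\n" st.2.2)]
    let sanitized := PySem.Str.strip (PySem.Str.join "\n\n" (sections.filter (fun s => s ≠ "")))
    if sanitized = "" then PySem.Str.strip output else sanitized

-- ===== PORT B =====
def pvHeaderNameB (line : String) : Option String :=
  let stripped := PySem.Str.strip line
  if PySem.Str.startswith stripped "=" && PySem.Str.endswith stripped "=" then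
    some (PySem.Str.lower (PySem.Str.strip (PySem.Str.stripChars stripped "=")))
  else none

-- the inner 'while … header_name is None' scans of Source B are takeWhile/dropWhile of the same predicate
def pvCollectB : List String → List String × List String
  | [] => ([], [])
  | l :: rest =>
    match pvHeaderNameB l with
    | some name =>
      if name = "failures" then
        let block := rest.takeWhile (fun x => (pvHeaderNameB x).isNone)
        let p := pvCollectB (rest.dropWhile (fun x => (pvHeaderNameB x).isNone))
        (l :: block ++ p.1, p.2)
      else if name = "short test summary info" then
        let block := rest.takeWhile (fun x => (pvHeaderNameB x).isNone)
        let p := pvCollectB (rest.dropWhile (fun x => (pvHeaderNameB x).isNone))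
        (p.1, l :: block ++ p.2)
      else pvCollectB rest
    | none => pvCollectB rest
termination_by ls => ls.length
decreasing_by
  all_goals first
    | exact Nat.lt_succ_of_le (List.length_dropWhile_le _ _)
    | exact Nat.lt_succ_self _

def sanitize_failure_output_py_alt (output : String) : String :=
  if PySem.Str.strip output = "" then ""
  else
    let lines := PySem.Str.splitlines output
    let p := pvCollectB lines
    let sections := [PySem.Str.strip (PySem.Str.join "\n" p.1),
                     PySem.Str.strip (PySem.Str.join "\n" p.2)]
    let sanitized := PySem.Str.strip (PySem.Str.join "\n\n" (sections.filter (fun s => s ≠ "")))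
    if sanitized = "" then PySem.Str.strip output else sanitized

-- ===== PRECONDITION & SPEC =====
def Spec_sanitize_failure_output_py (output : String) (out : String) : Prop := out = sanitize_failure_output_py_alt output
instance (output : String) (out : String) : Decidable (Spec_sanitize_failure_output_py output out) := by unfold Spec_sanitize_failure_output_py; infer_instance

-- ===== CLAIM (what is proved, stated in full; the proofs are below) =====
def Claim_equal_sanitize_failure_output_py : Prop := ∀ (output : String), Dom_sanitize_failure_output_py output → Spec_sanitize_failure_output_py output (sanitize_failure_output_py output)

-- ===== LEMMAS AND PROOFS =====

lemma stepA_acc (cur : String) (f s : List String) (l : String) :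
    pvStepA (cur, f, s) l =
      ((pvStepA (cur, [], []) l).1,
       f ++ (pvStepA (cur, [], []) l).2.1,
       s ++ (pvStepA (cur, [], []) l).2.2) := by
  unfold pvStepA
  dsimp only
  split_ifs <;> simp

lemma foldA_acc (ls : List String) : ∀ (cur : String) (f s : List String),
    List.foldl pvStepA (cur, f, s) ls =
      ((List.foldl pvStepA (cur, [], []) ls).1,
       f ++ (List.foldl pvStepA (cur, [], []) ls).2.1,
       s ++ (List.foldl pvStepA (cur, [], []) ls).2.2) := by
  induction ls with
  | nil => intro cur f s; simp
  | cons l ls ih =>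
    intro cur f s
    rcases h : pvStepA (cur, ([] : List String), ([] : List String)) l with ⟨c', d, e⟩
    have hstep : pvStepA (cur, f, s) l = (c', f ++ d, s ++ e) := by
      rw [stepA_acc, h]
    simp only [List.foldl_cons, hstep, h]
    rw [ih c' (f ++ d) (s ++ e), ih c' d e]
    simp [List.append_assoc]

-- a line with no header name takes A's else-branch
lemma stepA_nonheader {l : String} (h : pvHeaderNameB l = none) (st : String × List String × List String) :
    pvStepA st l =
      (if st.1 = "failures" then (st.1, st.2.1 ++ [l], st.2.2)
       else if st.1 = "short test summary info" then (st.1, st.2.1, st.2.2 ++ [l])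
       else st) := by
  unfold pvHeaderNameB at h
  unfold pvStepA
  dsimp only
  split_ifs at h ⊢ <;> simp_all

-- a header line makes A's step ignore the incoming current_section
lemma stepA_header {l nm : String} (h : pvHeaderNameB l = some nm) (cur cur' : String) (f s : List String) :
    pvStepA (cur, f, s) l = pvStepA (cur', f, s) l := by
  unfold pvHeaderNameB at h
  unfold pvStepA
  dsimp only
  split_ifs at h ⊢ <;> simp_all

lemma blockF (block : List String) : ∀ (t f s : List String),
    (∀ x ∈ block, pvHeaderNameB x = none) →
    List.foldl pvStepA ("failures", f, s) (block ++ t) =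
      List.foldl pvStepA ("failures", f ++ block, s) t := by
  induction block with
  | nil => intro t f s _; simp
  | cons x bl ih =>
    intro t f s hall
    have hx : pvHeaderNameB x = none := hall x (by simp)
    simp only [List.cons_append, List.foldl_cons, stepA_nonheader hx, reduceIte]
    rw [ih t (f ++ [x]) s (fun y hy => hall y (by simp [hy]))]
    simp

lemma blockS (block : List String) : ∀ (t f s : List String),
    (∀ x ∈ block, pvHeaderNameB x = none) →
    List.foldl pvStepA ("short test summary info", f, s) (block ++ t) =
      List.foldl pvStepA ("short test summary info", f, s ++ block) t := by
  induction block with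
  | nil => intro t f s _; simp
  | cons x bl ih =>
    intro t f s hall
    have hx : pvHeaderNameB x = none := hall x (by simp)
    simp only [List.cons_append, List.foldl_cons, stepA_nonheader hx, reduceIte]
    rw [if_neg (by decide : ¬ ("short test summary info" : String) = "failures")]
    rw [ih t f (s ++ [x]) (fun y hy => hall y (by simp [hy]))]
    simp

-- after dropWhile the head (if any) is a header, so the fold forgets the current section
lemma fold_head_indep (t : List String)
    (ht : t = [] ∨ ∃ h t', t = h :: t' ∧ (pvHeaderNameB h).isSome)
    (cur cur' : String) (f s : List String) :
    (List.foldl pvStepA (cur, f, s) t).2 = (List.foldl pvStepA (cur', f, s) t).2 := by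
  rcases ht with rfl | ⟨h, t', rfl, hs⟩
  · rfl
  · rcases Option.isSome_iff_exists.mp hs with ⟨nm, hnm⟩
    simp only [List.foldl_cons, stepA_header hnm cur cur']

lemma dropWhile_shape (p : String → Bool) (l : List String) :
    l.dropWhile p = [] ∨ ∃ h t, l.dropWhile p = h :: t ∧ p h = false := by
  induction l with
  | nil => left; rfl
  | cons x xs ih =>
    by_cases hx : p x
    · simpa [hx] using ih
    · right; exact ⟨x, xs, by simp [hx], by simp [hx]⟩

lemma collect_eq (ls : List String) :
    (List.foldl pvStepA ("", [], []) ls).2 = pvCollectB ls := by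
  induction ls using pvCollectB.induct with
  | case1 => simp [pvCollectB]
  | case2 l rest hname ih =>
    -- header "failures"
    have hcond : pvStepA ("", ([] : List String), ([] : List String)) l = ("failures", [l], []) := by
      unfold pvHeaderNameB at hname
      unfold pvStepA
      dsimp only
      split_ifs at hname ⊢ <;> simp_all
    have hsplit : rest = rest.takeWhile (fun x => (pvHeaderNameB x).isNone) ++
        rest.dropWhile (fun x => (pvHeaderNameB x).isNone) :=
      (List.takeWhile_append_dropWhile ..).symm
    have hblock : ∀ x ∈ rest.takeWhile (fun x => (pvHeaderNameB x).isNone), pvHeaderNameB x = none := by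
      intro x hx
      have := List.mem_takeWhile_imp hx
      simpa [Option.isNone_iff_eq_none] using this
    have hshape : rest.dropWhile (fun x => (pvHeaderNameB x).isNone) = [] ∨
        ∃ h t, rest.dropWhile (fun x => (pvHeaderNameB x).isNone) = h :: t ∧ (pvHeaderNameB h).isSome := by
      rcases dropWhile_shape (fun x => (pvHeaderNameB x).isNone) rest with h | ⟨h, t, heq, hph⟩
      · exact Or.inl h
      · right; exact ⟨h, t, heq, by simpa [Option.isNone_iff_eq_none, Option.isSome_iff_ne_none] using hph⟩
    simp only [List.foldl_cons, hcond]
    conv_lhs => rw [hsplit]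
    rw [blockF _ _ _ _ hblock]
    rw [fold_head_indep _ hshape "failures" "" ([l] ++ rest.takeWhile (fun x => (pvHeaderNameB x).isNone)) []]
    rw [foldA_acc]
    unfold pvCollectB
    simp only [hname, reduceIte]
    rw [← ih]
    simp
  | case3 l rest hname hne ih =>
    -- header "short test summary info"
    have hcond : pvStepA ("", ([] : List String), ([] : List String)) l = ("short test summary info", [], [l]) := by
      unfold pvHeaderNameB at hname
      unfold pvStepA
      dsimp only
      split_ifs at hname ⊢ <;> simp_all
    have hsplit : rest = rest.takeWhile (fun x => (pvHeaderNameB x).isNone) ++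
        rest.dropWhile (fun x => (pvHeaderNameB x).isNone) :=
      (List.takeWhile_append_dropWhile ..).symm
    have hblock : ∀ x ∈ rest.takeWhile (fun x => (pvHeaderNameB x).isNone), pvHeaderNameB x = none := by
      intro x hx
      have := List.mem_takeWhile_imp hx
      simpa [Option.isNone_iff_eq_none] using this
    have hshape : rest.dropWhile (fun x => (pvHeaderNameB x).isNone) = [] ∨
        ∃ h t, rest.dropWhile (fun x => (pvHeaderNameB x).isNone) = h :: t ∧ (pvHeaderNameB h).isSome := by
      rcases dropWhile_shape (fun x => (pvHeaderNameB x).isNone) rest with h | ⟨h, t, heq, hph⟩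
      · exact Or.inl h
      · right; exact ⟨h, t, heq, by simpa [Option.isNone_iff_eq_none, Option.isSome_iff_ne_none] using hph⟩
    simp only [List.foldl_cons, hcond]
    conv_lhs => rw [hsplit]
    rw [blockS _ _ _ _ hblock]
    rw [fold_head_indep _ hshape "short test summary info" "" [] ([l] ++ rest.takeWhile (fun x => (pvHeaderNameB x).isNone))]
    rw [foldA_acc]
    unfold pvCollectB
    simp only [hname, reduceIte]
    rw [if_neg (by decide : ¬ ("short test summary info" : String) = "failures")]
    rw [← ih]
    simp
  | case4 l rest name hname hfail hsumm ih =>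
    -- header with an unrecognised name: current_section reset, nothing collected
    have hcond : pvStepA ("", ([] : List String), ([] : List String)) l = ("", [], []) := by
      unfold pvHeaderNameB at hname
      unfold pvStepA
      dsimp only
      split_ifs at hname ⊢ <;> simp_all
    simp only [List.foldl_cons, hcond]
    unfold pvCollectB
    simp only [hname, if_neg hfail, if_neg hsumm]
    exact ih
  | case5 l rest hname ih =>
    -- ordinary line outside any section
    have hcond : pvStepA ("", ([] : List String), ([] : List String)) l = ("", [], []) := by
      rw [stepA_nonheader hname]; simp
    simp only [List.foldl_cons, hcond]
    unfold pvCollectB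
    simp only [hname]
    exact ih

-- ===== VERDICT (by name: the statement is the Claim_ definition above) =====
theorem sanitize_failure_output_py_spec : Claim_equal_sanitize_failure_output_py := by
  intro output _
  unfold Spec_sanitize_failure_output_py sanitize_failure_output_py sanitize_failure_output_py_alt
  have h := collect_eq (PySem.Str.splitlines output)
  dsimp only
  rw [h]
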